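-- pv_equiv track=rewrite | github.com/SLI0124/metody-analyzy-textovych-dat | tasks/task6.py | unary_decode
-- ===== SOURCE A (Python) =====
-- def unary_decode(code):
--     """Decodes a unary-encoded string back to an integer. Examples: '0'→1, '10'→2, '110'→3"""
--     if code == '0':
--         return 1
--     count = 0
--     for char in code:
--         if char == '1':
--             count += 1
--         elif char == '0':
--             return count + 1
--     raise ValueError("Invalid unary code")
-- ===== SOURCE B (Python) =====
-- def unary_decode(code):
--     """Decodes a unary-encoded string back to an integer. Examples: '0'->1, '10'->2, '110'->3"""
--     if not code:
--         raise ValueError("Invalid unary code")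
--     head, rest = code[0], code[1:]
--     if head == '0':
--         return 1
--     return (head == '1') + unary_decode(rest)
-- ===== Notes on version B (the rewrite author's own statement) =====
-- stated objective: alternative
-- what changed: Replaces A's iterative fused scan (accumulator loop with early return plus a special-case '0' branch) with a structural recursion on the string: base case at the leading '0', otherwise recurse on the tail adding one when the head is '1'; no accumulator, no special case, same O(n) cost.
import Mathlib
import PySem

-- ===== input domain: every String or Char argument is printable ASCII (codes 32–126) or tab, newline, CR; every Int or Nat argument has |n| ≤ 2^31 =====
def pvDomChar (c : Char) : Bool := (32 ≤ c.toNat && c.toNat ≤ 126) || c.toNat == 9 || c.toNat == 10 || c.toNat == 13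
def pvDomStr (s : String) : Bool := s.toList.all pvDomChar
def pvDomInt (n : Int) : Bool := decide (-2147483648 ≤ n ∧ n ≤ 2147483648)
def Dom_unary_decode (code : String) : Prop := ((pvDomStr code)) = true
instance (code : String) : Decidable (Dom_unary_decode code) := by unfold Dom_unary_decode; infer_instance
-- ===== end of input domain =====

-- B replaces A's iterative accumulator scan by a structural recursion on the string (same value everywhere A returns; both raise ValueError when the string has no '0').


-- ===== PORT A =====
-- A's for-loop: counts '1's in an accumulator, returns count+1 at the first '0'; none = the ValueError path.
def unaryLoopA : List Char → Int → Option Int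
  | [], _ => none
  | c :: rest, count =>
      if c = '1' then unaryLoopA rest (count + 1)
      else if c = '0' then some (count + 1)
      else unaryLoopA rest count

def unary_decode (code : String) : Int :=
  if code = "0" then 1
  else (unaryLoopA code.toList 0).getD 0   -- none only outside Pre_ (the ValueError path)

-- ===== PORT B =====
-- B: structural recursion on the characters; none = the ValueError path (empty string reached).
def unaryRecB : List Char → Option Int
  | [] => none
  | c :: rest =>
      if c = '0' then some 1
      else (unaryRecB rest).map (fun v => (if c = '1' then (1 : Int) else 0) + v)

def unary_decode_alt (code : String) : Int :=
  (unaryRecB code.toList).getD 0   -- none only outside Pre_ (the ValueError path)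

-- ===== PRECONDITION & SPEC =====
-- Pre_ excludes exactly the inputs where both A and B raise ValueError (no '0' in the string).
def Pre_unary_decode (code : String) : Prop := '0' ∈ code.toList
instance (code : String) : Decidable (Pre_unary_decode code) := by unfold Pre_unary_decode; infer_instance
def pvWitness_unary_decode : String := "110"
def Spec_unary_decode (code : String) (out : Int) : Prop := out = unary_decode_alt code
instance (code : String) (out : Int) : Decidable (Spec_unary_decode code out) := by unfold Spec_unary_decode; infer_instance

-- ===== CLAIM =====
def Claim_equal_unary_decode : Prop := ∀ (code : String), Dom_unary_decode code → Pre_unary_decode code → Spec_unary_decode code (unary_decode code)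

-- ===== LEMMAS AND PROOFS =====
-- A's accumulator loop equals B's recursion shifted by the accumulator (holds for every list, including the ValueError path).
theorem unaryLoopA_eq_rec (l : List Char) (count : Int) :
    unaryLoopA l count = (unaryRecB l).map (fun v => count + v) := by
  induction l generalizing count with
  | nil => simp [unaryLoopA, unaryRecB]
  | cons c rest ih =>
      by_cases h1 : c = '1'
      · subst h1
        simp [unaryLoopA, unaryRecB, ih]
      · by_cases h0 : c = '0'
        · subst h0; simp [unaryLoopA, unaryRecB]
        · simp [unaryLoopA, unaryRecB, h1, h0, ih]

-- ===== VERDICT =====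
theorem unary_decode_spec : Claim_equal_unary_decode := by
  intro code _ hpre
  unfold Spec_unary_decode unary_decode unary_decode_alt
  by_cases h0 : code = "0"
  · subst h0; decide
  · rw [if_neg h0, unaryLoopA_eq_rec]
    cases unaryRecB code.toList <;> simp
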